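-- pv_equiv track=rewrite | github.com/Howuhh/cs_algorithms | other/coursera_20min.py | nearest_bomb_shelter_nlogn
-- ===== SOURCE A (Python) =====
-- from math import inf
-- from bisect import bisect_left
--
-- def nearest_bomb_shelter_nlogn(cities, shelters):
--     shelters = sorted([(v, i) for i, v in enumerate(shelters)])
--     nearests, n = [], len(shelters)
--
--     for city in cities:
--         idx = bisect_left(shelters, (city, inf))
--
--         before = (inf, inf) if idx - 1 < 0 else (abs(city - shelters[idx - 1][0]), idx - 1)
--         on = (abs(city - shelters[idx][0]), idx) if idx < n else (inf, inf)
--         after = (inf, inf) if idx + 1 >= n else (abs(city - shelters[idx + 1][0]), idx + 1)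
--
--         nearests.append(shelters[min(before, on, after)[1]][1] + 1)
--
--     return nearests
-- ===== SOURCE B (Python) =====
-- def nearest_bomb_shelter_nlogn(cities, shelters):
--     # sort shelters and cities together with their original indices, then one
--     # two-pointer sweep over the sorted cities instead of a binary search per city
--     ss = sorted((v, i) for i, v in enumerate(shelters))
--     cs = sorted((v, i) for i, v in enumerate(cities))
--     n = len(ss)
--     res = [0] * len(cities)
--     j = 0
--     for c, p in cs:
--         while j < n and ss[j][0] <= c:
--             j += 1
--         if j > 0 and (j == n or c - ss[j - 1][0] <= ss[j][0] - c):
--             res[p] = ss[j - 1][1] + 1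
--         else:
--             res[p] = ss[j][1] + 1
--     return res
-- ===== Notes on version B (the rewrite author's own statement) =====
-- stated objective: alternative
-- what changed: Replaces the per-city binary search with its three-candidate min over (inf,inf)-sentinel tuples by sorting the cities together with their positions and running a single two-pointer merge over the two sorted lists, scattering each answer back to the city's original slot.
import Mathlib
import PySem

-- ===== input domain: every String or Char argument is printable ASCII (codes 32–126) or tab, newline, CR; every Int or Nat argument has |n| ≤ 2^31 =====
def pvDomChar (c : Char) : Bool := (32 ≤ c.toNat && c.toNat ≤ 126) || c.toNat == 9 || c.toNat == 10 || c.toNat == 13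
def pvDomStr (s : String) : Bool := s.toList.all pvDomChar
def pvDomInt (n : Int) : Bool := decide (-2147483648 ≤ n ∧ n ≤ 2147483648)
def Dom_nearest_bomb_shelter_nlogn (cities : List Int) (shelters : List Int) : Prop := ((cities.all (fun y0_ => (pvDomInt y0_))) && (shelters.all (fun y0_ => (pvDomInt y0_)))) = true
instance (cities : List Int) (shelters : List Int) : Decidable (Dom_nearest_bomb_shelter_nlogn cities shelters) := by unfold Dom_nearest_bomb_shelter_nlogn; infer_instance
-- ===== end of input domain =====

-- B replaces A's per-city binary search (with its three-candidate min over (inf,inf) sentinels)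
-- by one two-pointer merge of the sorted cities with the sorted shelters, scattering answers
-- back to each city's original position; equivalence of the return value is proved for
-- non-empty shelters (with empty shelters and a city, A raises TypeError).

-- ===== PORT A =====
-- hand port of bisect.bisect_left(shelters, (city, inf)): the pure-Python lo/hi loop;
-- the comparison shelters[mid] < (city, inf) is exactly shelters[mid][0] ≤ city, because the
-- second components are ints and int < inf always holds (exact on the whole Int domain).
def pvBisect (ss : List (Int × Int)) (c : Int) (lo hi : Nat) : Nat :=
  if _h : lo < hi then
    if (ss.getD ((lo + hi) / 2) (0, 0)).1 ≤ c then pvBisect ss c ((lo + hi) / 2 + 1) hi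
    else pvBisect ss c lo ((lo + hi) / 2)
  else lo
termination_by hi - lo
decreasing_by all_goals omega

-- Python's min of two (dist, idx) tuples, none playing the role of (inf, inf):
-- min(a, b) returns b iff b < a (leftmost on ties), tuples compared lexicographically.
def pvMinC (a b : Option (Int × Nat)) : Option (Int × Nat) :=
  match a, b with
  | none, none => none
  | none, some q => some q
  | some p, none => some p
  | some p, some q => if q.1 < p.1 ∨ (q.1 = p.1 ∧ q.2 < p.2) then some q else some p

-- the body of A's loop for one city
def pvCityA (ss : List (Int × Int)) (n : Nat) (c : Int) : Int :=
  let idx := pvBisect ss c 0 n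
  let before : Option (Int × Nat) :=
    if idx = 0 then none else some (|c - (ss.getD (idx - 1) (0, 0)).1|, idx - 1)
  let on : Option (Int × Nat) :=
    if idx < n then some (|c - (ss.getD idx (0, 0)).1|, idx) else none
  let after : Option (Int × Nat) :=
    if idx + 1 ≥ n then none else some (|c - (ss.getD (idx + 1) (0, 0)).1|, idx + 1)
  match pvMinC (pvMinC before on) after with
  | some pk => (ss.getD pk.2 (0, 0)).2 + 1
  | none => 0  -- Python indexes shelters[inf] here (TypeError); only reachable with shelters = [], excluded by Pre_

def nearest_bomb_shelter_nlogn (cities : List Int) (shelters : List Int) : List Int :=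
  let ss := PySem.List.sorted2 ((PySem.List.enumerate shelters).map (fun p => (p.2, p.1)))
      (fun p => p.1) (fun p => p.2)
  cities.foldl (fun acc city => acc ++ [pvCityA ss ss.length city]) []

-- ===== PORT B =====
-- the while loop advancing the shelter pointer
def pvAdv (ss : List (Int × Int)) (c : Int) (j : Nat) : Nat :=
  if _h : j < ss.length ∧ (ss.getD j (0, 0)).1 ≤ c then pvAdv ss c (j + 1) else j
termination_by ss.length - j
decreasing_by omega

-- B's if/else choosing the low or high shelter
def pvChoose (ss : List (Int × Int)) (n : Nat) (c : Int) (j : Nat) : Int :=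
  if 0 < j ∧ (j = n ∨ c - (ss.getD (j - 1) (0, 0)).1 ≤ (ss.getD j (0, 0)).1 - c)
  then (ss.getD (j - 1) (0, 0)).2 + 1
  else (ss.getD j (0, 0)).2 + 1

def nearest_bomb_shelter_nlogn_alt (cities : List Int) (shelters : List Int) : List Int :=
  let ss := PySem.List.sorted2 ((PySem.List.enumerate shelters).map (fun p => (p.2, p.1)))
      (fun p => p.1) (fun p => p.2)
  let cs := PySem.List.sorted2 ((PySem.List.enumerate cities).map (fun p => (p.2, p.1)))
      (fun p => p.1) (fun p => p.2)
  -- res[p] = … : p is an enumerate index, 0 ≤ p < len(cities), where List.set is exact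
  (cs.foldl (fun (st : Nat × List Int) p =>
      (pvAdv ss p.1 st.1, st.2.set p.2.toNat (pvChoose ss ss.length p.1 (pvAdv ss p.1 st.1))))
    ((0 : Nat), List.replicate cities.length (0 : Int))).2

-- ===== PRECONDITION & SPEC =====
-- Pre_ excludes empty shelters together with a non-empty cities list, on which A raises
-- TypeError (indexing with the inf sentinel).
def Pre_nearest_bomb_shelter_nlogn (cities : List Int) (shelters : List Int) : Prop :=
  shelters ≠ [] ∨ cities = []
instance (cities : List Int) (shelters : List Int) : Decidable (Pre_nearest_bomb_shelter_nlogn cities shelters) := by unfold Pre_nearest_bomb_shelter_nlogn; infer_instance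
def pvWitness_nearest_bomb_shelter_nlogn : List Int × List Int := ([3, -1, 4], [0, 5])
def Spec_nearest_bomb_shelter_nlogn (cities : List Int) (shelters : List Int) (out : List Int) : Prop := out = nearest_bomb_shelter_nlogn_alt cities shelters
instance (cities : List Int) (shelters : List Int) (out : List Int) : Decidable (Spec_nearest_bomb_shelter_nlogn cities shelters out) := by unfold Spec_nearest_bomb_shelter_nlogn; infer_instance

-- ===== CLAIM (what is proved, stated in full; the proofs are below) =====
def Claim_equal_nearest_bomb_shelter_nlogn : Prop := ∀ (cities : List Int) (shelters : List Int), Dom_nearest_bomb_shelter_nlogn cities shelters → Pre_nearest_bomb_shelter_nlogn cities shelters → Spec_nearest_bomb_shelter_nlogn cities shelters (nearest_bomb_shelter_nlogn cities shelters)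

-- ===== LEMMAS AND PROOFS =====

-- lexicographic ≤ on (value, index) pairs
def pvLexLe (a b : Int × Int) : Prop := a.1 < b.1 ∨ (a.1 = b.1 ∧ a.2 ≤ b.2)

theorem pvLexLe_trans {a b c : Int × Int} (h1 : pvLexLe a b) (h2 : pvLexLe b c) : pvLexLe a c := by
  unfold pvLexLe at *; omega

theorem pairwise_insertBy_lex (x : Int × Int) (ys : List (Int × Int))
    (h : List.Pairwise pvLexLe ys) :
    List.Pairwise pvLexLe
      (PySem.List.insertBy
        (fun a b => decide (a.1 < b.1) || (!decide (b.1 < a.1) && decide (a.2 < b.2))) x ys) := by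
  induction ys with
  | nil => simp [PySem.List.insertBy]
  | cons y ys ih =>
    rw [PySem.List.insertBy]
    by_cases hb : (decide (x.1 < y.1) || (!decide (y.1 < x.1) && decide (x.2 < y.2))) = true
    · simp only [hb, if_pos]
      have hxy : pvLexLe x y := by
        simp only [Bool.or_eq_true, Bool.and_eq_true, Bool.not_eq_true', decide_eq_true_eq,
          decide_eq_false_iff_not] at hb
        unfold pvLexLe; omega
      constructor
      · intro z hz
        rcases List.mem_cons.mp hz with rfl | hz
        · exact hxy
        · exact pvLexLe_trans hxy (List.rel_of_pairwise_cons h hz)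
      · exact h
    · rw [if_neg hb]
      have hyx : pvLexLe y x := by
        rcases lt_trichotomy y.1 x.1 with h1 | h1 | h1
        · exact Or.inl h1
        · refine Or.inr ⟨h1, ?_⟩
          by_contra h2
          have e1 : ¬ x.1 < y.1 := by omega
          have e2 : ¬ y.1 < x.1 := by omega
          have e3 : x.2 < y.2 := by omega
          exact hb (by simp [e1, e2, e3])
        · exact absurd (by simp [h1]) hb
      constructor
      · intro z hz
        rcases (PySem.List.mem_insertBy _ _ _ _).mp hz with rfl | hz
        · exact hyx
        · exact List.rel_of_pairwise_cons h hz
      · exact ih (List.Pairwise.of_cons h)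

theorem foldl_insertBy_pairwise (xs : List (Int × Int)) :
    ∀ acc : List (Int × Int), List.Pairwise pvLexLe acc →
    List.Pairwise pvLexLe
      (xs.foldl (fun acc x => PySem.List.insertBy
        (fun a b => decide (a.1 < b.1) || (!decide (b.1 < a.1) && decide (a.2 < b.2))) x acc) acc) := by
  induction xs with
  | nil => intro acc h; exact h
  | cons x xs ih =>
    intro acc h
    exact ih _ (pairwise_insertBy_lex x acc h)

theorem sorted2_pairwise_lex (xs : List (Int × Int)) :
    List.Pairwise pvLexLe (PySem.List.sorted2 xs (fun p => p.1) (fun p => p.2)) := by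
  unfold PySem.List.sorted2
  exact foldl_insertBy_pairwise xs [] List.Pairwise.nil

-- monotonicity of the first components of a lex-sorted list
def pvMono (ss : List (Int × Int)) : Prop :=
  ∀ p q : Nat, ∀ hpq : p ≤ q, ∀ hq : q < ss.length,
    (ss[p]'(Nat.lt_of_le_of_lt hpq hq)).1 ≤ (ss[q]'hq).1

theorem mono_of_pairwise {ss : List (Int × Int)} (h : List.Pairwise pvLexLe ss) : pvMono ss := by
  intro p q hpq hq
  rcases Nat.lt_or_ge p q with hlt | hge
  · have hp : p < ss.length := Nat.lt_of_le_of_lt hpq hq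
    have h2 := List.pairwise_iff_getElem.mp h p q hp hq hlt
    unfold pvLexLe at h2; omega
  · have heq : p = q := by omega
    subst heq; rfl

-- the characterisation of "first index whose shelter value exceeds c"
def IsIdxP (ss : List (Int × Int)) (c : Int) (j : Nat) : Prop :=
  j ≤ ss.length ∧ (∀ k, ∀ hk : k < ss.length, k < j → (ss[k]'hk).1 ≤ c) ∧
    (∀ hj : j < ss.length, c < (ss[j]'hj).1)

theorem isIdxP_unique {ss : List (Int × Int)} {c : Int} {j1 j2 : Nat}
    (h1 : IsIdxP ss c j1) (h2 : IsIdxP ss c j2) : j1 = j2 := by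
  obtain ⟨l1, b1, a1⟩ := h1
  obtain ⟨l2, b2, a2⟩ := h2
  rcases Nat.lt_trichotomy j1 j2 with h | h | h
  · have hj1 : j1 < ss.length := by omega
    have ha := a1 hj1
    have hb := b2 j1 hj1 h
    omega
  · exact h
  · have hj2 : j2 < ss.length := by omega
    have ha := a2 hj2
    have hb := b1 j2 hj2 h
    omega

theorem adv_isIdx (ss : List (Int × Int)) (c : Int) :
    ∀ (m j : Nat), ss.length - j ≤ m → j ≤ ss.length →
    (∀ k, ∀ hk : k < ss.length, k < j → (ss[k]'hk).1 ≤ c) →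
    IsIdxP ss c (pvAdv ss c j) := by
  intro m
  induction m with
  | zero =>
    intro j hm hj hk
    have hje : j = ss.length := by omega
    rw [pvAdv]
    rw [dif_neg (by omega)]
    exact ⟨hj, hk, fun hjl => by omega⟩
  | succ m ih =>
    intro j hm hj hk
    rw [pvAdv]
    by_cases h : j < ss.length ∧ (ss.getD j (0, 0)).1 ≤ c
    · rw [dif_pos h]
      apply ih (j + 1) (by omega) (by omega)
      intro k hkl hkj
      rcases Nat.lt_or_ge k j with hlt | hge
      · exact hk k hkl hlt
      · have hkj' : k = j := by omega
        subst hkj'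
        have := h.2
        rwa [List.getD_eq_getElem _ _ h.1] at this
    · rw [dif_neg h]
      refine ⟨hj, hk, fun hjl => ?_⟩
      rw [Decidable.not_and_iff_not_or_not] at h
      rcases h with h | h
      · omega
      · rw [List.getD_eq_getElem _ _ hjl] at h; omega

theorem bisect_isIdx (ss : List (Int × Int)) (c : Int) (hm : pvMono ss) :
    ∀ (m lo hi : Nat), hi - lo ≤ m → lo ≤ hi → hi ≤ ss.length →
    (∀ k, ∀ hk : k < ss.length, k < lo → (ss[k]'hk).1 ≤ c) →
    (∀ k, ∀ hk : k < ss.length, hi ≤ k → c < (ss[k]'hk).1) →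
    IsIdxP ss c (pvBisect ss c lo hi) := by
  intro m
  induction m with
  | zero =>
    intro lo hi hfuel hle hhi hklo hkhi
    have : ¬ lo < hi := by omega
    rw [pvBisect, dif_neg this]
    refine ⟨by omega, hklo, fun hjl => hkhi lo hjl (by omega)⟩
  | succ m ih =>
    intro lo hi hfuel hle hhi hklo hkhi
    rw [pvBisect]
    by_cases hlh : lo < hi
    · rw [dif_pos hlh]
      have hmid : (lo + hi) / 2 < ss.length := by omega
      by_cases hc : (ss.getD ((lo + hi) / 2) (0, 0)).1 ≤ c
      · rw [if_pos hc]
        rw [List.getD_eq_getElem _ _ hmid] at hc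
        apply ih ((lo + hi) / 2 + 1) hi (by omega) (by omega) hhi
        · intro k hkl hk
          calc (ss[k]'hkl).1 ≤ (ss[(lo + hi) / 2]'hmid).1 := hm k _ (by omega) hmid
            _ ≤ c := hc
        · exact hkhi
      · rw [if_neg hc]
        rw [List.getD_eq_getElem _ _ hmid] at hc
        apply ih lo ((lo + hi) / 2) (by omega) (by omega) (by omega) hklo
        intro k hkl hk
        calc c < (ss[(lo + hi) / 2]'hmid).1 := by omega
          _ ≤ (ss[k]'hkl).1 := hm _ k hk hkl
    · rw [dif_neg hlh]
      have : lo = hi := by omega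
      subst this
      refine ⟨by omega, hklo, fun hjl => hkhi lo hjl (by omega)⟩

-- the common per-city answer
def pvAns (ss : List (Int × Int)) (c : Int) : Int :=
  pvChoose ss ss.length c (pvAdv ss c 0)

theorem pvMinC_none_some (q : Int × Nat) : pvMinC none (some q) = some q := rfl
theorem pvMinC_some_none (p : Int × Nat) : pvMinC (some p) none = some p := rfl
theorem pvMinC_some_some (p q : Int × Nat) :
    pvMinC (some p) (some q)
      = if q.1 < p.1 ∨ (q.1 = p.1 ∧ q.2 < p.2) then some q else some p := rfl

theorem cityA_eq_ans (ss : List (Int × Int)) (c : Int)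
    (hpw : List.Pairwise pvLexLe ss) (hne : ss ≠ []) :
    pvCityA ss ss.length c = pvAns ss c := by
  have hm : pvMono ss := mono_of_pairwise hpw
  have hn : 0 < ss.length := List.length_pos_iff.mpr hne
  have hb : IsIdxP ss c (pvBisect ss c 0 ss.length) :=
    bisect_isIdx ss c hm ss.length 0 ss.length (by omega) (by omega) (by omega)
      (by intro k hk h; omega) (by intro k hk h; omega)
  have ha : IsIdxP ss c (pvAdv ss c 0) :=
    adv_isIdx ss c ss.length 0 (by omega) (by omega) (by intro k hk h; omega)
  have heq : pvAdv ss c 0 = pvBisect ss c 0 ss.length := isIdxP_unique ha hb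
  unfold pvAns pvChoose pvCityA
  dsimp only
  rw [heq]
  set idx := pvBisect ss c 0 ss.length with hidx
  clear_value idx
  clear heq ha hidx
  obtain ⟨hle, hbelow, habove⟩ := hb
  rcases Nat.eq_zero_or_pos idx with h0 | h0
  · -- idx = 0 : there is no before candidate and on beats after
    subst h0
    have h0n : 0 < ss.length := hn
    have f0 : c < (ss.getD 0 (0, 0)).1 := by
      rw [List.getD_eq_getElem _ _ h0n]; exact habove h0n
    rw [if_pos rfl, if_pos h0n]
    by_cases h1 : 0 + 1 ≥ ss.length
    · rw [if_pos h1, pvMinC_none_some, pvMinC_some_none, if_neg (by omega)]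
    · rw [if_neg h1]
      have h1n : 1 < ss.length := by omega
      have f01 : (ss.getD 0 (0, 0)).1 ≤ (ss.getD 1 (0, 0)).1 := by
        rw [List.getD_eq_getElem _ _ h0n, List.getD_eq_getElem _ _ h1n]
        exact hm 0 1 (by omega) h1n
      have a0 : |c - (ss.getD 0 (0, 0)).1| = (ss.getD 0 (0, 0)).1 - c := by
        rw [abs_of_neg (by omega)]; ring
      have a1 : |c - (ss.getD (0 + 1) (0, 0)).1| = (ss.getD (0 + 1) (0, 0)).1 - c := by
        have : (0 + 1 : Nat) = 1 := rfl
        rw [this]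
        have f1 : (ss.getD 0 (0, 0)).1 ≤ (ss.getD 1 (0, 0)).1 := f01
        rw [abs_of_neg (by omega)]; ring
      rw [pvMinC_none_some, pvMinC_some_some]
      rw [a0, a1]
      have f01' : (ss.getD 0 (0, 0)).1 ≤ (ss.getD (0 + 1) (0, 0)).1 := f01
      rw [if_neg (by dsimp only; omega), if_neg (by omega)]
  · -- idx > 0
    have hprev : idx - 1 < ss.length := by omega
    have flow : (ss.getD (idx - 1) (0, 0)).1 ≤ c := by
      rw [List.getD_eq_getElem _ _ hprev]; exact hbelow (idx - 1) hprev (by omega)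
    have ab : |c - (ss.getD (idx - 1) (0, 0)).1| = c - (ss.getD (idx - 1) (0, 0)).1 :=
      abs_of_nonneg (by omega)
    rw [if_neg (by omega)]
    rcases Nat.lt_or_ge idx ss.length with hin | hin
    · -- 0 < idx < n
      have fon : c < (ss.getD idx (0, 0)).1 := by
        rw [List.getD_eq_getElem _ _ hin]; exact habove hin
      have ao : |c - (ss.getD idx (0, 0)).1| = (ss.getD idx (0, 0)).1 - c := by
        rw [abs_of_neg (by omega)]; ring
      rw [if_pos hin]
      by_cases h1 : idx + 1 ≥ ss.length
      · rw [if_pos h1, pvMinC_some_some, ab, ao]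
        by_cases hcmp : c - (ss.getD (idx - 1) (0, 0)).1 ≤ (ss.getD idx (0, 0)).1 - c
        · rw [if_neg (by dsimp only; omega), pvMinC_some_none, if_pos ⟨h0, Or.inr hcmp⟩]
        · rw [if_pos (by dsimp only; omega), pvMinC_some_none,
            if_neg (by rintro ⟨-, h | h⟩ <;> omega)]
      · rw [if_neg h1]
        have h1n : idx + 1 < ss.length := by omega
        have fup : (ss.getD idx (0, 0)).1 ≤ (ss.getD (idx + 1) (0, 0)).1 := by
          rw [List.getD_eq_getElem _ _ hin, List.getD_eq_getElem _ _ h1n]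
          exact hm idx (idx + 1) (by omega) h1n
        have aa : |c - (ss.getD (idx + 1) (0, 0)).1| = (ss.getD (idx + 1) (0, 0)).1 - c := by
          rw [abs_of_neg (by omega)]; ring
        rw [pvMinC_some_some, ab, ao]
        by_cases hcmp : c - (ss.getD (idx - 1) (0, 0)).1 ≤ (ss.getD idx (0, 0)).1 - c
        · rw [if_neg (by dsimp only; omega), pvMinC_some_some, aa,
            if_neg (by dsimp only; omega), if_pos ⟨h0, Or.inr hcmp⟩]
        · rw [if_pos (by dsimp only; omega), pvMinC_some_some, aa,
            if_neg (by dsimp only; omega),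
            if_neg (by rintro ⟨-, h | h⟩ <;> omega)]
    · -- idx = n : only the before candidate exists
      have hie : idx = ss.length := by omega
      rw [if_neg (by omega), if_pos (by omega), pvMinC_some_none, pvMinC_some_none,
        if_pos ⟨h0, Or.inl hie⟩]

-- A's foldl-append loop is a map
theorem foldl_append_city (ss : List (Int × Int)) (cities : List Int) :
    ∀ acc : List Int,
    cities.foldl (fun acc city => acc ++ [pvCityA ss ss.length city]) acc
      = acc ++ cities.map (pvCityA ss ss.length) := by
  induction cities with
  | nil => intro acc; simp
  | cons c cs ih => intro acc; simp [ih]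

-- B's stateful loop computes pvAns for each pair, independently of the threaded pointer
theorem go_eq_scatter (ss : List (Int × Int)) :
    ∀ (cs : List (Int × Int)) (j : Nat) (res : List Int),
    List.Pairwise (fun a b : Int × Int => a.1 ≤ b.1) cs →
    j ≤ ss.length →
    (∀ p ∈ cs, ∀ k, ∀ hk : k < ss.length, k < j → (ss[k]'hk).1 ≤ p.1) →
    (cs.foldl (fun (st : Nat × List Int) p =>
        (pvAdv ss p.1 st.1, st.2.set p.2.toNat (pvChoose ss ss.length p.1 (pvAdv ss p.1 st.1))))
      (j, res)).2
    = cs.foldl (fun r p => r.set p.2.toNat (pvAns ss p.1)) res := by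
  intro cs
  induction cs with
  | nil => intro j res _ _ _; rfl
  | cons p cs ih =>
    intro j res hpw hj hbound
    have hstep : IsIdxP ss p.1 (pvAdv ss p.1 j) :=
      adv_isIdx ss p.1 ss.length j (by omega) hj (hbound p (by simp))
    have h0 : IsIdxP ss p.1 (pvAdv ss p.1 0) :=
      adv_isIdx ss p.1 ss.length 0 (by omega) (by omega) (by intro k hk h; omega)
    have hjeq : pvAdv ss p.1 j = pvAdv ss p.1 0 := isIdxP_unique hstep h0
    simp only [List.foldl_cons]
    rw [ih (pvAdv ss p.1 j) _ (List.Pairwise.of_cons hpw) hstep.1 ?_]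
    · rw [hjeq]; rfl
    · intro q hq k hk hkj
      calc (ss[k]'hk).1 ≤ p.1 := hstep.2.1 k hk hkj
        _ ≤ q.1 := List.rel_of_pairwise_cons hpw hq

-- a scatter over pairs (cities[k], k) fills slot k with f cities[k]
theorem scatter_length (f : Int → Int) :
    ∀ (ps : List (Int × Int)) (res : List Int),
    (ps.foldl (fun r p => r.set p.2.toNat (f p.1)) res).length = res.length := by
  intro ps
  induction ps with
  | nil => intro res; rfl
  | cons p ps ih => intro res; simp [ih]

theorem scatter_getElem (cities : List Int) (f : Int → Int) :
    ∀ (ps : List (Int × Int)) (res : List Int),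
    (∀ p ∈ ps, ∃ k : Nat, ∃ hk : k < cities.length, p.2 = (k : Int) ∧ p.1 = cities[k]) →
    res.length = cities.length →
    ∀ (i : Nat), ∀ hi : i < cities.length,
    (ps.foldl (fun r p => r.set p.2.toNat (f p.1)) res)[i]?
      = if (∃ p ∈ ps, p.2 = (i : Int)) then some (f (cities[i]'hi)) else res[i]? := by
  intro ps
  induction ps with
  | nil =>
    intro res _ _ i hi
    simp
  | cons p ps ih =>
    intro res hv hlen i hi
    simp only [List.foldl_cons]
    rw [ih _ (fun q hq => hv q (by simp [hq])) (by simp [hlen]) i hi]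
    obtain ⟨k, hk, hp2, hp1⟩ := hv p (by simp)
    by_cases hmem : ∃ q ∈ ps, q.2 = (i : Int)
    · obtain ⟨q, hq, hq2⟩ := hmem
      rw [if_pos ⟨q, hq, hq2⟩, if_pos ⟨q, List.mem_cons_of_mem p hq, hq2⟩]
    · rw [if_neg hmem]
      by_cases hpi : p.2 = (i : Int)
      · rw [if_pos ⟨p, List.mem_cons_self, hpi⟩]
        have hki : k = i := by omega
        subst hki
        rw [hp2, Int.toNat_natCast]
        rw [List.getElem?_set_self (by omega)]
        rw [hp1]
      · rw [if_neg ?_]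
        · rw [List.getElem?_set_ne (by rw [hp2, Int.toNat_natCast]; omega)]
        · rintro ⟨q, hqmem, hq2⟩
          rcases List.mem_cons.mp hqmem with rfl | hqt
          · exact hpi hq2
          · exact hmem ⟨q, hqt, hq2⟩

-- membership description of the sorted city pairs
theorem mem_cs_iff (cities : List Int) (p : Int × Int) :
    p ∈ PySem.List.sorted2 ((PySem.List.enumerate cities).map (fun q => (q.2, q.1)))
        (fun q => q.1) (fun q => q.2)
    ↔ ∃ k : Nat, ∃ hk : k < cities.length, p = ((cities[k]'hk : Int), (k : Int)) := by
  rw [(PySem.List.sorted2_perm _ _ _ _).mem_iff]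
  simp only [List.mem_map, PySem.List.mem_enumerate_iff]
  constructor
  · rintro ⟨q, ⟨k, hk, rfl⟩, rfl⟩
    exact ⟨k, hk, by simp⟩
  · rintro ⟨k, hk, rfl⟩
    exact ⟨((k : Int), cities[k]'hk), ⟨k, hk, by simp⟩, rfl⟩

theorem alt_eq_map (cities shelters : List Int) :
    nearest_bomb_shelter_nlogn_alt cities shelters
      = cities.map (pvAns (PySem.List.sorted2
          ((PySem.List.enumerate shelters).map (fun p => (p.2, p.1)))
          (fun p => p.1) (fun p => p.2))) := by
  unfold nearest_bomb_shelter_nlogn_alt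
  set ss := PySem.List.sorted2 ((PySem.List.enumerate shelters).map (fun p => (p.2, p.1)))
      (fun p => p.1) (fun p => p.2) with hss
  set cs := PySem.List.sorted2 ((PySem.List.enumerate cities).map (fun p => (p.2, p.1)))
      (fun p => p.1) (fun p => p.2) with hcs
  have hpw : List.Pairwise (fun a b : Int × Int => a.1 ≤ b.1) cs := by
    refine List.Pairwise.imp ?_ (sorted2_pairwise_lex _)
    intro a b h; unfold pvLexLe at h; omega
  rw [go_eq_scatter ss cs 0 _ hpw (by omega) (by intro p hp k hk h; omega)]
  have hv : ∀ p ∈ cs, ∃ k : Nat, ∃ hk : k < cities.length, p.2 = (k : Int) ∧ p.1 = cities[k] := by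
    intro p hp
    obtain ⟨k, hk, rfl⟩ := (mem_cs_iff cities p).mp hp
    exact ⟨k, hk, rfl, rfl⟩
  apply List.ext_getElem
  · rw [scatter_length, List.length_replicate, List.length_map]
  · intro i hi1 hi2
    have hi : i < cities.length := by
      rw [scatter_length, List.length_replicate] at hi1; exact hi1
    have := scatter_getElem cities (pvAns ss) cs (List.replicate cities.length 0)
      hv (by simp) i hi
    have hmem : ∃ p ∈ cs, p.2 = (i : Int) := by
      refine ⟨((cities[i]'hi : Int), (i : Int)), ?_, rfl⟩
      exact (mem_cs_iff cities _).mpr ⟨i, hi, rfl⟩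
    rw [if_pos hmem] at this
    have h1 := List.getElem?_eq_getElem hi1
    rw [this] at h1
    have h2 : (cities.map (pvAns ss))[i] = pvAns ss (cities[i]'hi) := by
      simp
    simp only [h2]
    exact (Option.some_injective _ h1.symm)

-- ===== VERDICT (by name: the statement is the Claim_ definition above) =====
theorem nearest_bomb_shelter_nlogn_spec : Claim_equal_nearest_bomb_shelter_nlogn := by
  intro cities shelters _hdom hpre
  unfold Spec_nearest_bomb_shelter_nlogn
  by_cases hc : cities = []
  · subst hc
    rfl
  · have hsh : shelters ≠ [] := by
      rcases hpre with h | h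
      · exact h
      · exact absurd h hc
    rw [alt_eq_map]
    unfold nearest_bomb_shelter_nlogn
    set ss := PySem.List.sorted2 ((PySem.List.enumerate shelters).map (fun p => (p.2, p.1)))
        (fun p => p.1) (fun p => p.2) with hss
    have hpw : List.Pairwise pvLexLe ss := sorted2_pairwise_lex _
    have hne : ss ≠ [] := by
      have hlen : ss.length = shelters.length := by
        rw [hss, (PySem.List.sorted2_perm _ _ _ _).length_eq, List.length_map,
          PySem.List.length_enumerate]
      intro h
      rw [h] at hlen
      exact hsh (List.eq_nil_of_length_eq_zero hlen.symm)
    rw [foldl_append_city]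
    simp only [List.nil_append]
    exact List.map_congr_left (fun c _ => cityA_eq_ans ss c hpw hne)
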